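-- pv_equiv track=rewrite | github.com/jezhuuz/Python-and-Assembly | PS3/ps3pr2.py | num_multiples
-- ===== SOURCE A (Python) =====
-- def num_multiples(m, values):
--     """ Takes input m, integer, and values, list of integers, and returns the number of
--     integers in values that are multiples of m
--
--     uses recursion
--     """
--
--
--     if len(values) == 0:
--         return 0
--     else:
--         rest = num_multiples(m, values[1:])
--         if values[0] % m == 0:
--             return rest + 1
--         else:
--             return rest
-- ===== SOURCE B (Python) =====
-- def num_multiples(m, values):
--     count = 0
--     for v in values:
--         if v % m == 0:
--             count += 1
--     return count
-- ===== Notes on version B (the rewrite author's own statement) =====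
-- stated objective: simpler
-- what changed: Replaces the recursion-over-tail with list slicing by a single flat loop with a count accumulator.
import Mathlib
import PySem

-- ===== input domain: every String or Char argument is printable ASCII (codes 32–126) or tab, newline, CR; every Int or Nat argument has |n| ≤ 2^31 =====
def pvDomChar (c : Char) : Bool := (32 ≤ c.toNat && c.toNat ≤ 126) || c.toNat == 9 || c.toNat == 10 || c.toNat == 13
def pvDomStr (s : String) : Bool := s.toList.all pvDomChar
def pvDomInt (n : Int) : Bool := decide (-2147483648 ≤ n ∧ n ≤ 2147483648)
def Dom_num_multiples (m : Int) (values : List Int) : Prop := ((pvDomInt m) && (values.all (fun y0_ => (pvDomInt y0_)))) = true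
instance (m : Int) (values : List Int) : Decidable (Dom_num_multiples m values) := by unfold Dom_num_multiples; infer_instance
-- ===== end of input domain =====

-- B replaces A's slicing recursion by a single flat counting loop (simpler; no slice copies).


-- ===== PORT A =====
def num_multiples (m : Int) (values : List Int) : Int :=
  match values with
  | [] => 0
  | v :: tl =>
    let rest := num_multiples m tl   -- values[1:]
    if PySem.Int.mod v m = 0 then rest + 1 else rest

-- ===== PORT B =====
def num_multiples_alt (m : Int) (values : List Int) : Int :=
  values.foldl (fun count v => if PySem.Int.mod v m = 0 then count + 1 else count) 0

-- ===== PRECONDITION & SPEC =====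
-- Pre_ excludes m = 0 with a nonempty list: there 'v % m' raises ZeroDivisionError in both programs.
def Pre_num_multiples (m : Int) (values : List Int) : Prop := m ≠ 0 ∨ values = []
instance (m : Int) (values : List Int) : Decidable (Pre_num_multiples m values) := by unfold Pre_num_multiples; infer_instance
def pvWitness_num_multiples : Int × List Int := (3, [3, 4, 6, -9, 0])
def Spec_num_multiples (m : Int) (values : List Int) (out : Int) : Prop := out = num_multiples_alt m values
instance (m : Int) (values : List Int) (out : Int) : Decidable (Spec_num_multiples m values out) := by unfold Spec_num_multiples; infer_instance

-- ===== CLAIM (what is proved, stated in full; the proofs are below) =====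
def Claim_equal_num_multiples : Prop := ∀ (m : Int) (values : List Int), Dom_num_multiples m values → Pre_num_multiples m values → Spec_num_multiples m values (num_multiples m values)

-- ===== LEMMAS AND PROOFS =====
theorem num_multiples_foldl (m : Int) (values : List Int) (c : Int) :
    values.foldl (fun count v => if PySem.Int.mod v m = 0 then count + 1 else count) c
      = c + num_multiples m values := by
  induction values generalizing c with
  | nil => simp [num_multiples]
  | cons v tl ih =>
    simp only [List.foldl, num_multiples]
    rw [ih]
    split_ifs <;> ring

-- ===== VERDICT (by name: the statement is the Claim_ definition above) =====
theorem num_multiples_spec : Claim_equal_num_multiples := by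
  intro m values _ _
  unfold Spec_num_multiples num_multiples_alt
  rw [num_multiples_foldl]
  ring
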